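-- pv_equiv track=rewrite | github.com/frhd143/FrequencyAnalysis | frekvens_analys.py | closest_word
-- ===== SOURCE A (Python) =====
-- def closest_word(freq_dict, rate):
--     freq_dict_list = list(freq_dict.items())
--     new_list = []
--     for i in freq_dict_list:
--         new_list.append(i[1])
--     # Find the nearest or closest vallue in a list to a given number
--     closest_value = min(new_list, key=lambda x:abs(x-rate))
--     for i in freq_dict_list:
--         if i[1] == closest_value:
--             return i[0]
-- ===== SOURCE B (Python) =====
-- def closest_word(freq_dict, rate):
--     return min(freq_dict.items(), key=lambda kv: abs(kv[1] - rate))[0]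
-- ===== Notes on version B (the rewrite author's own statement) =====
-- stated objective: simpler
-- what changed: Replaces A's three passes (collect values into a list, min over that list, rescan items for the first matching key) with a single min over the items keyed by distance, taking the key of the nearest item directly.
import Mathlib
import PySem

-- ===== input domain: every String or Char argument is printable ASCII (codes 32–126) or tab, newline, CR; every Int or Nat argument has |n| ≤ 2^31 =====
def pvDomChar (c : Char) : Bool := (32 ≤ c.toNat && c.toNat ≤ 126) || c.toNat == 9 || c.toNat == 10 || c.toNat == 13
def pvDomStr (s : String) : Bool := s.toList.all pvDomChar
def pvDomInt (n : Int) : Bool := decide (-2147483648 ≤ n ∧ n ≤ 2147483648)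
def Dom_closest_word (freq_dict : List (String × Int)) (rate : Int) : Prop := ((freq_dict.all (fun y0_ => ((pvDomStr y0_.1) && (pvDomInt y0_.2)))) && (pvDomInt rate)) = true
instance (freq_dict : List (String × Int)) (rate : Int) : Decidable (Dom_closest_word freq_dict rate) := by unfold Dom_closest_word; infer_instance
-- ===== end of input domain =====

-- B replaces A's three passes (values list, min over values, rescan for the key)
-- with one min over the items keyed by distance; objective: simpler.

-- ===== PORT A =====
def closest_word (freq_dict : List (String × Int)) (rate : Int) : String :=
  let freq_dict_list := freq_dict
  let new_list := freq_dict_list.foldl (fun acc i => acc ++ [i.2]) []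
  match PySem.List.min? new_list (fun x => |x - rate|) with
  | none => ""   -- empty dict: Python's min raises ValueError (excluded by Pre_)
  | some closest_value =>
    match freq_dict_list.find? (fun i => i.2 == closest_value) with
    | some i => i.1
    | none => ""  -- unreachable in Python: closest_value is one of the values

-- ===== PORT B =====
def closest_word_alt (freq_dict : List (String × Int)) (rate : Int) : String :=
  match PySem.List.min? freq_dict (fun kv => |kv.2 - rate|) with
  | some kv => kv.1
  | none => ""   -- empty dict: Python's min raises ValueError (excluded by Pre_)

-- ===== PRECONDITION & SPEC =====
-- Python A (and B) raise ValueError (min of empty sequence) on the empty dict.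
def Pre_closest_word (freq_dict : List (String × Int)) (rate : Int) : Prop := freq_dict ≠ []
instance (freq_dict : List (String × Int)) (rate : Int) : Decidable (Pre_closest_word freq_dict rate) := by unfold Pre_closest_word; infer_instance
def pvWitness_closest_word : (List (String × Int)) × Int := ([("a", 3), ("b", 7)], 4)

def Spec_closest_word (freq_dict : List (String × Int)) (rate : Int) (out : String) : Prop := out = closest_word_alt freq_dict rate
instance (freq_dict : List (String × Int)) (rate : Int) (out : String) : Decidable (Spec_closest_word freq_dict rate out) := by unfold Spec_closest_word; infer_instance

-- ===== CLAIM (what is proved, stated in full; the proofs are below) =====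
def Claim_equal_closest_word : Prop := ∀ (freq_dict : List (String × Int)) (rate : Int), Dom_closest_word freq_dict rate → Pre_closest_word freq_dict rate → Spec_closest_word freq_dict rate (closest_word freq_dict rate)

-- ===== LEMMAS AND PROOFS =====

-- A's first loop builds exactly the list of values.
theorem foldl_append_snd (xs : List (String × Int)) :
    ∀ acc : List Int, xs.foldl (fun acc i => acc ++ [i.2]) acc = acc ++ xs.map Prod.snd := by
  induction xs with
  | nil => intro acc; simp
  | cons x t ih => intro acc; simp [List.foldl, ih]

-- min over the mapped list is the map of min over the original (same comparisons).
theorem minstep_map {α β : Type} (f : α → β) (k : β → Int) :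
    ∀ (xs : List α) (a : Option α),
      xs.foldl (fun acc x =>
          match acc with
          | none => some (f x)
          | some m => if k (f x) < k m then some (f x) else some m) (a.map f)
        = (xs.foldl (fun acc x =>
          match acc with
          | none => some x
          | some m => if k (f x) < k (f m) then some x else some m) a).map f := by
  intro xs
  induction xs with
  | nil => intro a; rfl
  | cons x t ih =>
    intro a
    cases a with
    | none => simpa [List.foldl] using ih (some x)
    | some m =>
      simp only [List.foldl, Option.map_some]
      by_cases h : k (f x) < k (f m) <;> simp [h, ← ih]

theorem min?_map {α β : Type} (f : α → β) (k : β → Int) (xs : List α) :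
    PySem.List.min? (xs.map f) k = (PySem.List.min? xs (fun x => k (f x))).map f := by
  simp only [PySem.List.min?, List.foldl_map]
  exact minstep_map f k xs none

-- the fold from `some a` returns a minimum that strictly beats everything before it
theorem min_foldl_first {α : Type} (k : α → Int) :
    ∀ (t : List α) (a r : α),
      t.foldl (fun acc x =>
          match acc with
          | none => some x
          | some m => if k x < k m then some x else some m) (some a) = some r →
      k r ≤ k a ∧ (∀ x ∈ t, k r ≤ k x) ∧
        (r = a ∨ ∃ l1 l2, t = l1 ++ r :: l2 ∧ k r < k a ∧ ∀ x ∈ l1, k r < k x) := by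
  intro t
  induction t with
  | nil =>
    intro a r h
    simp only [List.foldl, Option.some.injEq] at h
    exact ⟨le_of_eq (by rw [h]), by simp, Or.inl h.symm⟩
  | cons x t ih =>
    intro a r h
    simp only [List.foldl] at h
    by_cases hx : k x < k a
    · simp only [hx, if_pos] at h
      obtain ⟨h1, h2, h3⟩ := ih x r h
      refine ⟨le_of_lt (lt_of_le_of_lt h1 hx), ?_, ?_⟩
      · intro y hy
        rcases List.mem_cons.mp hy with rfl | hy
        · exact h1
        · exact h2 _ hy
      · rcases h3 with rfl | ⟨l1, l2, rfl, hlt, hall⟩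
        · exact Or.inr ⟨[], t, rfl, hx, by simp⟩
        · refine Or.inr ⟨x :: l1, l2, rfl, lt_trans hlt hx, ?_⟩
          intro y hy
          rcases List.mem_cons.mp hy with rfl | hy
          · exact hlt
          · exact hall _ hy
    · simp only [hx, if_neg, not_false_iff] at h
      obtain ⟨h1, h2, h3⟩ := ih a r h
      have hax : k a ≤ k x := not_lt.mp hx
      refine ⟨h1, ?_, ?_⟩
      · intro y hy
        rcases List.mem_cons.mp hy with rfl | hy
        · exact le_trans h1 hax
        · exact h2 _ hy
      · rcases h3 with rfl | ⟨l1, l2, rfl, hlt, hall⟩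
        · exact Or.inl rfl
        · refine Or.inr ⟨x :: l1, l2, rfl, hlt, ?_⟩
          intro y hy
          rcases List.mem_cons.mp hy with rfl | hy
          · exact lt_of_lt_of_le hlt hax
          · exact hall _ hy

theorem min?_first {α : Type} (k : α → Int) (xs : List α) (m : α)
    (h : PySem.List.min? xs k = some m) :
    ∃ l1 l2, xs = l1 ++ m :: l2 ∧ ∀ x ∈ l1, k m < k x := by
  cases xs with
  | nil => simp [PySem.List.min?] at h
  | cons x t =>
    simp only [PySem.List.min?, List.foldl] at h
    obtain ⟨h1, _, h3⟩ := min_foldl_first k t x m h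
    rcases h3 with rfl | ⟨l1, l2, rfl, hlt, hall⟩
    · exact ⟨[], t, rfl, by simp⟩
    · refine ⟨x :: l1, l2, rfl, ?_⟩
      intro y hy
      rcases List.mem_cons.mp hy with rfl | hy
      · exact hlt
      · exact hall _ hy

theorem find?_prefix_false {α : Type} (p : α → Bool) (m : α) :
    ∀ l1 l2 : List α, (∀ x ∈ l1, p x = false) → p m = true →
      (l1 ++ m :: l2).find? p = some m := by
  intro l1
  induction l1 with
  | nil => intro l2 _ hm; simp [hm]
  | cons x t ih =>
    intro l2 hall hm
    have hx : p x = false := hall x (by simp)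
    simp [hx, ih l2 (fun y hy => hall y (by simp [hy])) hm]

-- ===== VERDICT (by name: the statement is the Claim_ definition above) =====
set_option maxHeartbeats 1000000 in
theorem closest_word_spec : Claim_equal_closest_word := by
  intro fd rate _ hpre
  cases hmin : PySem.List.min? fd (fun kv => |kv.2 - rate|) with
  | none => exact absurd ((PySem.List.min?_eq_none_iff _ _).mp hmin) hpre
  | some m =>
    have hB : closest_word_alt fd rate = m.1 := by
      unfold closest_word_alt; rw [hmin]
    have hval : PySem.List.min? (fd.map Prod.snd) (fun x => |x - rate|) = some m.2 := by
      rw [min?_map Prod.snd (fun x => |x - rate|) fd, hmin]; rfl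
    have hA : closest_word fd rate = m.1 := by
      obtain ⟨l1, l2, hsplit, hall⟩ := min?_first (fun kv => |kv.2 - rate|) fd m hmin
      have hfind : fd.find? (fun i => i.2 == m.2) = some m := by
        rw [hsplit]
        refine find?_prefix_false (fun i => i.2 == m.2) m l1 l2 ?_ (by simp)
        intro x hx
        have hlt := hall x hx
        simp only [beq_eq_false_iff_ne, ne_eq]
        intro hsnd
        simp [hsnd] at hlt
      unfold closest_word
      simp only [foldl_append_snd fd, List.nil_append]
      rw [hval]
      simp only [hfind]
    unfold Spec_closest_word
    rw [hA, hB]
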